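-- pv_equiv track=rewrite | github.com/lnh24390-jpg/- | 단어 퍼즐.py | solution
-- ===== SOURCE A (Python) =====
-- def solution(strs, t):
--     # 매우 큰 값 (불가능 상태 표현)
--     INF = float('inf')
--
--     # dp[i] : t의 앞 i글자를 만들기 위한 최소 단어 개수
--     dp = [INF] * (len(t) + 1)
--
--     # 초기 상태 (아무 것도 사용하지 않음)
--     dp[0] = 0
--
--     # 빠른 탐색을 위해 set으로 변환
--     word_set = set(strs)
--
--     # 문자열 길이만큼 순회
--     for i in range(1, len(t) + 1):
--
--         # 단어 최대 길이가 5이므로 1~5만 확인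
--         for l in range(1, 6):
--             if i - l < 0:
--                 continue
--
--             # 현재 위치에서 끝나는 substring
--             sub = t[i - l:i]
--
--             # 해당 substring이 존재하면
--             if sub in word_set:
--                 dp[i] = min(dp[i], dp[i - l] + 1)
--
--     # 끝까지 만들 수 없는 경우
--     return dp[len(t)] if dp[len(t)] != INF else -1
-- ===== SOURCE B (Python) =====
-- def solution(strs, t):
--     n = len(t)
--     # usable words (the task caps word length at 5, as A's inner loop does; empty words can never match)
--     words = {w for w in strs if 1 <= len(w) <= 5}
--     # best[i]: fewest words spelling the suffix t[i:], None if impossible; filled right-to-left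
--     best = [None] * (n + 1)
--     best[n] = 0
--     for i in range(n - 1, -1, -1):
--         cands = [best[i + len(w)] for w in words
--                  if t[i:i + len(w)] == w and best[i + len(w)] is not None]
--         if cands:
--             best[i] = 1 + min(cands)
--     return best[0] if best[0] is not None else -1
-- ===== Notes on version B (the rewrite author's own statement) =====
-- stated objective: alternative
-- what changed: A fills a forward prefix-DP table pulling over substring lengths 1..5 ending at each position; B fills a backward suffix-DP table right-to-left, scanning the (length-capped) word set with a startswith-style slice comparison at each position and taking 1 + min of the reachable suffix values, with None instead of float('inf') as the unreachable sentinel.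
import Mathlib
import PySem

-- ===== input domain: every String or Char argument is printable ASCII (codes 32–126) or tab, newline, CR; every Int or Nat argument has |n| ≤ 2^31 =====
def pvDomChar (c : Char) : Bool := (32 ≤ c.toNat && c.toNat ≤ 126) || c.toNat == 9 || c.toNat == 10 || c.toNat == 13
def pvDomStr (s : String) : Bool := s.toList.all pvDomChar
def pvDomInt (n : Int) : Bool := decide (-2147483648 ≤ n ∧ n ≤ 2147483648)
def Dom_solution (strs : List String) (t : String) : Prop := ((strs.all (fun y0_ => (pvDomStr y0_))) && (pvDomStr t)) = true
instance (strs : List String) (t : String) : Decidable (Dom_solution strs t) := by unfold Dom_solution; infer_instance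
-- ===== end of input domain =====

-- B replaces A's forward prefix DP (pull over substring lengths 1..5) by a backward suffix DP
-- that scans the word set itself; alternative decomposition, same asymptotic cost.

-- ===== PORT A =====
-- A's `float('inf')` is only an unreachable sentinel: ported as `none : Option Int`,
-- with Python's `min` and `+ 1` lifted accordingly (exact: every finite dp value is an int).
def ominA : Option Int → Option Int → Option Int
  | none, b => b
  | some x, none => some x
  | some x, some y => some (min x y)

def oadd1 : Option Int → Option Int
  | none => none
  | some x => some (x + 1)

def solution (strs : List String) (t : String) : Int :=
  let dp : List (Option Int) := List.replicate (PySem.Str.len t + 1).toNat none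
  let dp := PySem.List.pySetD dp 0 (some 0)
  let word_set : PySem.Set String := PySem.Set.ofList strs
  let dp := (PySem.List.pyRange 1 (PySem.Str.len t + 1) 1).foldl (fun dp i =>
    (PySem.List.pyRange 1 6 1).foldl (fun dp l =>
      if i - l < 0 then dp
      else
        let sub := PySem.Str.slice t (some (i - l)) (some i)
        if PySem.Set.contains word_set sub then
          PySem.List.pySetD dp i (ominA (PySem.List.pyGetD dp i none)
            (oadd1 (PySem.List.pyGetD dp (i - l) none)))
        else dp) dp) dp
  match PySem.List.pyGetD dp (PySem.Str.len t) none with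
  | some v => v
  | none => -1

-- ===== PORT B =====
def solution_alt (strs : List String) (t : String) : Int :=
  let n := PySem.Str.len t
  let words : PySem.Set String :=
    PySem.Set.ofList (strs.filter (fun w => decide (1 ≤ PySem.Str.len w) && decide (PySem.Str.len w ≤ 5)))
  let best : List (Option Int) := List.replicate (n + 1).toNat none
  let best := PySem.List.pySetD best n (some 0)
  let best := (PySem.List.pyRange (n - 1) (-1) (-1)).foldl (fun best i =>
    let cands : List Int := words.filterMap (fun w =>
      if PySem.Str.slice t (some i) (some (i + PySem.Str.len w)) == w then
        PySem.List.pyGetD best (i + PySem.Str.len w) none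
      else none)
    match PySem.List.min? cands (fun x => x) with
    | some m => PySem.List.pySetD best i (some (1 + m))
    | none => best) best
  match PySem.List.pyGetD best 0 none with
  | some v => v
  | none => -1

-- ===== PRECONDITION & SPEC =====
def Spec_solution (strs : List String) (t : String) (out : Int) : Prop := out = solution_alt strs t
instance (strs : List String) (t : String) (out : Int) : Decidable (Spec_solution strs t out) := by unfold Spec_solution; infer_instance

-- ===== CLAIM (what is proved, stated in full; the proofs are below) =====
def Claim_equal_solution : Prop := ∀ (strs : List String) (t : String), Dom_solution strs t → Spec_solution strs t (solution strs t)

-- ===== LEMMAS AND PROOFS =====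

-- the substring t[a:b] (natural indices)
def pvSeg (t : String) (a b : Nat) : String := PySem.Str.slice t (some (a : Int)) (some (b : Int))

abbrev pvMem (strs : List String) (t : String) (a b : Nat) : Prop := pvSeg t a b ∈ strs

-- a usable block: nonempty, length ≤ 5, inside t, and a listed word
def pvOk (strs : List String) (t : String) (a b : Nat) : Prop :=
  a < b ∧ b ≤ a + 5 ∧ b ≤ t.toList.length ∧ pvMem strs t a b

-- t[a:b] splits into exactly k usable blocks
inductive pvSegs (strs : List String) (t : String) : Nat → Nat → Nat → Prop
  | nil (a : Nat) : pvSegs strs t a a 0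
  | cons {a m b k} : pvOk strs t a m → pvSegs strs t m b k → pvSegs strs t a b (k + 1)

-- A's forward recurrence (value of dp[b]), blocks taken off the right end
def pvMA (strs : List String) (t : String) : Nat → Option Int
  | 0 => some 0
  | (b + 1) =>
    let c := fun (l : Nat) (r : Option Int) =>
      if l ≤ b + 1 ∧ pvMem strs t (b + 1 - l) (b + 1) then oadd1 r else none
    ominA (ominA (ominA (ominA (c 1 (pvMA strs t (b + 1 - 1))) (c 2 (pvMA strs t (b + 1 - 2))))
      (c 3 (pvMA strs t (b + 1 - 3)))) (c 4 (pvMA strs t (b + 1 - 4)))) (c 5 (pvMA strs t (b + 1 - 5)))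
  termination_by b => b
  decreasing_by all_goals omega

-- B's backward recurrence: value of best[n - d] (d = remaining suffix length), blocks off the left end
def pvNB (strs : List String) (t : String) (n : Nat) : Nat → Option Int
  | 0 => some 0
  | (d + 1) =>
    let o := fun (l : Nat) (r : Option Int) =>
      if l ≤ d + 1 ∧ pvMem strs t (n - (d + 1)) (n - (d + 1) + l) then r else none
    (PySem.List.min? (([o 1 (pvNB strs t n d), o 2 (pvNB strs t n (d - 1)),
        o 3 (pvNB strs t n (d - 2)), o 4 (pvNB strs t n (d - 3)),
        o 5 (pvNB strs t n (d - 4))]).filterMap id) (fun x => x)).map (fun m => 1 + m)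
  termination_by d => d
  decreasing_by all_goals omega

-- o is the least k with P k (none = no such k)
def pvIsMin (P : Nat → Prop) : Option Int → Prop
  | none => ∀ k, ¬ P k
  | some v => ∃ k : Nat, v = (k : Int) ∧ P k ∧ ∀ j, P j → k ≤ j

theorem ominA_none_right (a : Option Int) : ominA a none = a := by
  cases a <;> rfl

theorem ominA_none_left (a : Option Int) : ominA none a = a := rfl

theorem ominA_assoc (a b c : Option Int) : ominA (ominA a b) c = ominA a (ominA b c) := by
  cases a <;> cases b <;> cases c <;> simp [ominA, min_assoc]

theorem oadd1_if (G : Prop) [Decidable G] (r : Option Int) :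
    oadd1 (if G then r else none) = if G then oadd1 r else none := by
  split <;> rfl

theorem pvIsMin_unique {P : Nat → Prop} {o o' : Option Int}
    (h : pvIsMin P o) (h' : pvIsMin P o') : o = o' := by
  cases o with
  | none => cases o' with
    | none => rfl
    | some v => obtain ⟨k, _, hk, _⟩ := h'; exact absurd hk (h k)
  | some v => cases o' with
    | none => obtain ⟨k, _, hk, _⟩ := h; exact absurd hk (h' k)
    | some v' =>
      obtain ⟨k, rfl, hk, hmin⟩ := h
      obtain ⟨k', rfl, hk', hmin'⟩ := h'
      have := hmin k' hk'
      have := hmin' k hk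
      congr 1; omega
theorem pvIsMin_congr {P Q : Nat → Prop} {o : Option Int}
    (hpq : ∀ k, P k ↔ Q k) (h : pvIsMin P o) : pvIsMin Q o := by
  cases o with
  | none => intro k hq; exact h k ((hpq k).mpr hq)
  | some v =>
    obtain ⟨k, rfl, hk, hmin⟩ := h
    exact ⟨k, rfl, (hpq k).mp hk, fun j hj => hmin j ((hpq j).mpr hj)⟩
theorem pvIsMin_omin {P Q : Nat → Prop} {o o' : Option Int}
    (h : pvIsMin P o) (h' : pvIsMin Q o') : pvIsMin (fun k => P k ∨ Q k) (ominA o o') := by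
  cases o with
  | none =>
    cases o' with
    | none => intro k hk; rcases hk with hk | hk; exacts [h k hk, h' k hk]
    | some v =>
      obtain ⟨k, rfl, hk, hmin⟩ := h'
      exact ⟨k, rfl, Or.inr hk, fun j hj => hj.elim (fun hp => absurd hp (h j)) (hmin j)⟩
  | some v =>
    cases o' with
    | none =>
      obtain ⟨k, rfl, hk, hmin⟩ := h
      exact ⟨k, rfl, Or.inl hk, fun j hj => hj.elim (hmin j) (fun hq => absurd hq (h' j))⟩
    | some v' =>
      obtain ⟨k, rfl, hk, hmin⟩ := h
      obtain ⟨k', rfl, hk', hmin'⟩ := h'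
      refine ⟨min k k', by simp [Nat.cast_min], ?_, ?_⟩
      · rcases Nat.le_total k k' with hle | hle
        · simpa [Nat.min_eq_left hle] using Or.inl hk
        · simpa [Nat.min_eq_right hle] using Or.inr hk'
      · intro j hj; rcases hj with hj | hj
        · exact le_trans (Nat.min_le_left _ _) (hmin j hj)
        · exact le_trans (Nat.min_le_right _ _) (hmin' j hj)
theorem pvIsMin_shift_guard (G : Prop) [Decidable G] {Q : Nat → Prop} {o : Option Int}
    (h : pvIsMin Q o) :
    pvIsMin (fun k => ∃ j, k = j + 1 ∧ G ∧ Q j) (if G then oadd1 o else none) := by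
  split
  · cases o with
    | none => rintro k ⟨j, rfl, _, hq⟩; exact h j hq
    | some v =>
      obtain ⟨k, rfl, hk, hmin⟩ := h
      refine ⟨k + 1, by push_cast; ring, ⟨k, rfl, ‹G›, hk⟩, ?_⟩
      rintro j ⟨j', rfl, _, hq⟩; exact Nat.succ_le_succ (hmin j' hq)
  · rintro k ⟨j, rfl, hg, _⟩; exact absurd hg ‹¬G›
theorem pvmin_cons_eq (x : Int) (l : List Int) :
    PySem.List.min? (x :: l) (fun v => v) = ominA (some x) (PySem.List.min? l (fun v => v)) := by
  induction l generalizing x with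
  | nil =>
    have h0 : PySem.List.min? ([] : List Int) (fun v => v) = none := by
      rw [PySem.List.min?_eq_none_iff]
    rw [h0, ominA_none_right, PySem.List.min?_id_cons]
    rfl
  | cons y ys ih =>
    have e1 : PySem.List.min? (x :: y :: ys) (fun v => v)
        = PySem.List.min? (min x y :: ys) (fun v => v) := by
      rw [PySem.List.min?_id_cons, PySem.List.min?_id_cons, List.foldl_cons]
    rw [e1, ih (min x y), ih y, ← ominA_assoc]
    rfl

theorem pvMinChain (os : List (Option Int)) (acc : Option Int) :
    os.foldl (fun acc o => ominA acc (oadd1 o)) acc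
      = ominA acc ((PySem.List.min? (os.filterMap id) (fun x => x)).map (fun m => 1 + m)) := by
  induction os generalizing acc with
  | nil =>
    have h0 : PySem.List.min? ([] : List Int) (fun x => x) = none := by
      rw [PySem.List.min?_eq_none_iff]
    simp [h0, ominA_none_right]
  | cons o os ih =>
    rw [List.foldl_cons, ih, ominA_assoc]
    have : List.filterMap id (o :: os) =
        (match o with | none => List.filterMap id os | some x => x :: List.filterMap id os) := by
      cases o <;> rfl
    rw [this]
    congr 1
    cases o with
    | none => rfl
    | some x =>
      rw [pvmin_cons_eq]
      cases h : PySem.List.min? (os.filterMap id) (fun v => v) with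
      | none =>
        show ominA (some (x + 1)) none = some (1 + x)
        rw [ominA_none_right]
        congr 1; omega
      | some m =>
        show ominA (some (x + 1)) (some (1 + m)) = some (1 + min x m)
        show some (min (x + 1) (1 + m)) = some (1 + min x m)
        congr 1; omega
theorem pvMin?_ext (xs ys : List Int) (h : ∀ v : Int, v ∈ xs ↔ v ∈ ys) :
    PySem.List.min? xs (fun x => x) = PySem.List.min? ys (fun x => x) := by
  cases hx : PySem.List.min? xs (fun x => x) with
  | none =>
    rw [PySem.List.min?_eq_none_iff] at hx
    subst hx
    cases hy : PySem.List.min? ys (fun x => x) with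
    | none => rfl
    | some m => exact absurd ((h m).mpr (PySem.List.min?_mem hy)) (by simp)
  | some m =>
    cases hy : PySem.List.min? ys (fun x => x) with
    | none =>
      rw [PySem.List.min?_eq_none_iff] at hy; subst hy
      exact absurd ((h m).mp (PySem.List.min?_mem hx)) (by simp)
    | some m' =>
      have h1 := PySem.List.min?_isMin hx
      have h2 := PySem.List.min?_isMin hy
      have hm := (h m).mp (PySem.List.min?_mem hx)
      have hm' := (h m').mpr (PySem.List.min?_mem hy)
      have := h1 m' hm'
      have := h2 m hm
      simp at *; omega
theorem pvSegs_zero_iff (strs t a b) : pvSegs strs t a b 0 ↔ a = b := by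
  constructor
  · intro h; cases h; rfl
  · rintro rfl; exact pvSegs.nil a

theorem pvSegs_succ_iff (strs t a b k) :
    pvSegs strs t a b (k + 1) ↔ ∃ m, pvOk strs t a m ∧ pvSegs strs t m b k := by
  constructor
  · intro h; cases h with
    | cons hok hs => exact ⟨_, hok, hs⟩
  · rintro ⟨m, hok, hs⟩; exact pvSegs.cons hok hs

theorem pvSegs_snoc_iff (strs t a b k) :
    pvSegs strs t a b (k + 1) ↔ ∃ m, pvSegs strs t a m k ∧ pvOk strs t m b := by
  induction k generalizing a with
  | zero =>
    constructor
    · intro h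
      cases h with
      | cons hok hs =>
        cases hs with
        | nil => exact ⟨a, pvSegs.nil a, hok⟩
    · rintro ⟨m, hs, hok⟩
      cases hs with
      | nil => exact pvSegs.cons hok (pvSegs.nil b)
  | succ j ih =>
    constructor
    · intro h
      cases h with
      | cons hok hs =>
        obtain ⟨m, hs', hok'⟩ := (ih _).mp hs
        exact ⟨m, pvSegs.cons hok hs', hok'⟩
    · rintro ⟨m, hs, hok⟩
      cases hs with
      | cons hok0 hs0 =>
        exact pvSegs.cons hok0 ((ih _).mpr ⟨m, hs0, hok⟩)
-- the shared 5-candidate minimum step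
theorem pvIsMin_chain5 (G1 G2 G3 G4 G5 : Prop)
    [Decidable G1] [Decidable G2] [Decidable G3] [Decidable G4] [Decidable G5]
    (Q1 Q2 Q3 Q4 Q5 : Nat → Prop) (r1 r2 r3 r4 r5 : Option Int)
    (h1 : pvIsMin Q1 r1) (h2 : pvIsMin Q2 r2) (h3 : pvIsMin Q3 r3)
    (h4 : pvIsMin Q4 r4) (h5 : pvIsMin Q5 r5) :
    pvIsMin (fun k => ∃ j, k = j + 1 ∧
        ((G1 ∧ Q1 j) ∨ (G2 ∧ Q2 j) ∨ (G3 ∧ Q3 j) ∨ (G4 ∧ Q4 j) ∨ (G5 ∧ Q5 j)))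
      (ominA (ominA (ominA (ominA (if G1 then oadd1 r1 else none) (if G2 then oadd1 r2 else none))
        (if G3 then oadd1 r3 else none)) (if G4 then oadd1 r4 else none))
        (if G5 then oadd1 r5 else none)) := by
  have H :=
    pvIsMin_omin (pvIsMin_omin (pvIsMin_omin (pvIsMin_omin
      (pvIsMin_shift_guard G1 h1) (pvIsMin_shift_guard G2 h2))
      (pvIsMin_shift_guard G3 h3)) (pvIsMin_shift_guard G4 h4)) (pvIsMin_shift_guard G5 h5)
  refine pvIsMin_congr (fun k => ?_) H
  constructor
  · intro h
    rcases h with ((((⟨j,rfl,hg,hq⟩|⟨j,rfl,hg,hq⟩)|⟨j,rfl,hg,hq⟩)|⟨j,rfl,hg,hq⟩)|⟨j,rfl,hg,hq⟩)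
    · exact ⟨j, rfl, Or.inl ⟨hg, hq⟩⟩
    · exact ⟨j, rfl, Or.inr (Or.inl ⟨hg, hq⟩)⟩
    · exact ⟨j, rfl, Or.inr (Or.inr (Or.inl ⟨hg, hq⟩))⟩
    · exact ⟨j, rfl, Or.inr (Or.inr (Or.inr (Or.inl ⟨hg, hq⟩)))⟩
    · exact ⟨j, rfl, Or.inr (Or.inr (Or.inr (Or.inr ⟨hg, hq⟩)))⟩
  · rintro ⟨j, rfl, (⟨hg,hq⟩|⟨hg,hq⟩|⟨hg,hq⟩|⟨hg,hq⟩|⟨hg,hq⟩)⟩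
    · exact Or.inl (Or.inl (Or.inl (Or.inl ⟨j, rfl, hg, hq⟩)))
    · exact Or.inl (Or.inl (Or.inl (Or.inr ⟨j, rfl, hg, hq⟩)))
    · exact Or.inl (Or.inl (Or.inr ⟨j, rfl, hg, hq⟩))
    · exact Or.inl (Or.inr ⟨j, rfl, hg, hq⟩)
    · exact Or.inr ⟨j, rfl, hg, hq⟩
theorem pvMA_isMin (strs : List String) (t : String) :
    ∀ b, b ≤ t.toList.length → pvIsMin (pvSegs strs t 0 b) (pvMA strs t b) := by
  intro b
  induction b using Nat.strong_induction_on with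
  | _ b ih =>
    intro hbn
    cases b with
    | zero =>
      have e0 : pvMA strs t 0 = some 0 := by rw [pvMA]
      rw [e0]
      exact ⟨0, rfl, pvSegs.nil 0, fun j _ => Nat.zero_le j⟩
    | succ b =>
      have e : pvMA strs t (b + 1) =
          ominA (ominA (ominA (ominA
            (if 1 ≤ b + 1 ∧ pvMem strs t (b + 1 - 1) (b + 1) then oadd1 (pvMA strs t (b + 1 - 1)) else none)
            (if 2 ≤ b + 1 ∧ pvMem strs t (b + 1 - 2) (b + 1) then oadd1 (pvMA strs t (b + 1 - 2)) else none))
            (if 3 ≤ b + 1 ∧ pvMem strs t (b + 1 - 3) (b + 1) then oadd1 (pvMA strs t (b + 1 - 3)) else none))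
            (if 4 ≤ b + 1 ∧ pvMem strs t (b + 1 - 4) (b + 1) then oadd1 (pvMA strs t (b + 1 - 4)) else none))
            (if 5 ≤ b + 1 ∧ pvMem strs t (b + 1 - 5) (b + 1) then oadd1 (pvMA strs t (b + 1 - 5)) else none) := by
        rw [pvMA]
      rw [e]
      have H := pvIsMin_chain5
        (1 ≤ b + 1 ∧ pvMem strs t (b + 1 - 1) (b + 1))
        (2 ≤ b + 1 ∧ pvMem strs t (b + 1 - 2) (b + 1))
        (3 ≤ b + 1 ∧ pvMem strs t (b + 1 - 3) (b + 1))
        (4 ≤ b + 1 ∧ pvMem strs t (b + 1 - 4) (b + 1))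
        (5 ≤ b + 1 ∧ pvMem strs t (b + 1 - 5) (b + 1))
        (pvSegs strs t 0 (b + 1 - 1)) (pvSegs strs t 0 (b + 1 - 2)) (pvSegs strs t 0 (b + 1 - 3))
        (pvSegs strs t 0 (b + 1 - 4)) (pvSegs strs t 0 (b + 1 - 5))
        (pvMA strs t (b + 1 - 1)) (pvMA strs t (b + 1 - 2)) (pvMA strs t (b + 1 - 3))
        (pvMA strs t (b + 1 - 4)) (pvMA strs t (b + 1 - 5))
        (ih (b + 1 - 1) (by omega) (by omega)) (ih (b + 1 - 2) (by omega) (by omega))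
        (ih (b + 1 - 3) (by omega) (by omega)) (ih (b + 1 - 4) (by omega) (by omega))
        (ih (b + 1 - 5) (by omega) (by omega))
      refine pvIsMin_congr (fun k => ?_) H
      constructor
      · rintro ⟨j, rfl, (⟨⟨hl,hmem⟩,hseg⟩|⟨⟨hl,hmem⟩,hseg⟩|⟨⟨hl,hmem⟩,hseg⟩|⟨⟨hl,hmem⟩,hseg⟩|⟨⟨hl,hmem⟩,hseg⟩)⟩
        · exact (pvSegs_snoc_iff strs t 0 (b + 1) j).mpr ⟨b + 1 - 1, hseg, by omega, by omega, hbn, hmem⟩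
        · exact (pvSegs_snoc_iff strs t 0 (b + 1) j).mpr ⟨b + 1 - 2, hseg, by omega, by omega, hbn, hmem⟩
        · exact (pvSegs_snoc_iff strs t 0 (b + 1) j).mpr ⟨b + 1 - 3, hseg, by omega, by omega, hbn, hmem⟩
        · exact (pvSegs_snoc_iff strs t 0 (b + 1) j).mpr ⟨b + 1 - 4, hseg, by omega, by omega, hbn, hmem⟩
        · exact (pvSegs_snoc_iff strs t 0 (b + 1) j).mpr ⟨b + 1 - 5, hseg, by omega, by omega, hbn, hmem⟩
      · intro hseg
        match k, hseg with
        | 0, hseg =>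
          exfalso
          have := (pvSegs_zero_iff strs t 0 (b + 1)).mp hseg
          omega
        | (j + 1), hseg =>
          obtain ⟨m, hsm, hlt, hle5, _, hmem⟩ := (pvSegs_snoc_iff strs t 0 (b + 1) j).mp hseg
          refine ⟨j, rfl, ?_⟩
          have hl : b + 1 - m = 1 ∨ b + 1 - m = 2 ∨ b + 1 - m = 3 ∨ b + 1 - m = 4 ∨ b + 1 - m = 5 := by
            omega
          rcases hl with h|h|h|h|h
          · refine Or.inl ⟨⟨by omega, ?_⟩, ?_⟩
            · have hx : b + 1 - 1 = m := by omega
              rw [hx]; exact hmem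
            · have hx : b + 1 - 1 = m := by omega
              rw [hx]; exact hsm
          · refine Or.inr (Or.inl ⟨⟨by omega, ?_⟩, ?_⟩)
            · have hx : b + 1 - 2 = m := by omega
              rw [hx]; exact hmem
            · have hx : b + 1 - 2 = m := by omega
              rw [hx]; exact hsm
          · refine Or.inr (Or.inr (Or.inl ⟨⟨by omega, ?_⟩, ?_⟩))
            · have hx : b + 1 - 3 = m := by omega
              rw [hx]; exact hmem
            · have hx : b + 1 - 3 = m := by omega
              rw [hx]; exact hsm
          · refine Or.inr (Or.inr (Or.inr (Or.inl ⟨⟨by omega, ?_⟩, ?_⟩)))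
            · have hx : b + 1 - 4 = m := by omega
              rw [hx]; exact hmem
            · have hx : b + 1 - 4 = m := by omega
              rw [hx]; exact hsm
          · refine Or.inr (Or.inr (Or.inr (Or.inr ⟨⟨by omega, ?_⟩, ?_⟩)))
            · have hx : b + 1 - 5 = m := by omega
              rw [hx]; exact hmem
            · have hx : b + 1 - 5 = m := by omega
              rw [hx]; exact hsm
theorem pvNB_isMin (strs : List String) (t : String) :
    ∀ d, d ≤ t.toList.length →
      pvIsMin (pvSegs strs t (t.toList.length - d) t.toList.length)
        (pvNB strs t t.toList.length d) := by
  intro d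
  induction d using Nat.strong_induction_on with
  | _ d ih =>
    intro hdn
    cases d with
    | zero =>
      have e0 : pvNB strs t t.toList.length 0 = some 0 := by rw [pvNB]
      rw [e0, Nat.sub_zero]
      refine ⟨0, rfl, pvSegs.nil _, fun j _ => Nat.zero_le j⟩
    | succ d =>
      set n := t.toList.length with hn
      have e : pvNB strs t n (d + 1) =
          ominA (ominA (ominA (ominA
            (if 1 ≤ d + 1 ∧ pvMem strs t (n - (d + 1)) (n - (d + 1) + 1) then oadd1 (pvNB strs t n d) else none)
            (if 2 ≤ d + 1 ∧ pvMem strs t (n - (d + 1)) (n - (d + 1) + 2) then oadd1 (pvNB strs t n (d - 1)) else none))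
            (if 3 ≤ d + 1 ∧ pvMem strs t (n - (d + 1)) (n - (d + 1) + 3) then oadd1 (pvNB strs t n (d - 2)) else none))
            (if 4 ≤ d + 1 ∧ pvMem strs t (n - (d + 1)) (n - (d + 1) + 4) then oadd1 (pvNB strs t n (d - 3)) else none))
            (if 5 ≤ d + 1 ∧ pvMem strs t (n - (d + 1)) (n - (d + 1) + 5) then oadd1 (pvNB strs t n (d - 4)) else none) := by
        have h1 := pvMinChain ([(if 1 ≤ d + 1 ∧ pvMem strs t (n - (d + 1)) (n - (d + 1) + 1) then pvNB strs t n d else none),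
            (if 2 ≤ d + 1 ∧ pvMem strs t (n - (d + 1)) (n - (d + 1) + 2) then pvNB strs t n (d - 1) else none),
            (if 3 ≤ d + 1 ∧ pvMem strs t (n - (d + 1)) (n - (d + 1) + 3) then pvNB strs t n (d - 2) else none),
            (if 4 ≤ d + 1 ∧ pvMem strs t (n - (d + 1)) (n - (d + 1) + 4) then pvNB strs t n (d - 3) else none),
            (if 5 ≤ d + 1 ∧ pvMem strs t (n - (d + 1)) (n - (d + 1) + 5) then pvNB strs t n (d - 4) else none)] : List (Option Int)) none
        rw [ominA_none_left] at h1
        have h2 : ([(if 1 ≤ d + 1 ∧ pvMem strs t (n - (d + 1)) (n - (d + 1) + 1) then pvNB strs t n d else none),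
            (if 2 ≤ d + 1 ∧ pvMem strs t (n - (d + 1)) (n - (d + 1) + 2) then pvNB strs t n (d - 1) else none),
            (if 3 ≤ d + 1 ∧ pvMem strs t (n - (d + 1)) (n - (d + 1) + 3) then pvNB strs t n (d - 2) else none),
            (if 4 ≤ d + 1 ∧ pvMem strs t (n - (d + 1)) (n - (d + 1) + 4) then pvNB strs t n (d - 3) else none),
            (if 5 ≤ d + 1 ∧ pvMem strs t (n - (d + 1)) (n - (d + 1) + 5) then pvNB strs t n (d - 4) else none)] : List (Option Int)).foldl (fun acc o => ominA acc (oadd1 o)) none =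
            ominA (ominA (ominA (ominA
            (if 1 ≤ d + 1 ∧ pvMem strs t (n - (d + 1)) (n - (d + 1) + 1) then oadd1 (pvNB strs t n d) else none)
            (if 2 ≤ d + 1 ∧ pvMem strs t (n - (d + 1)) (n - (d + 1) + 2) then oadd1 (pvNB strs t n (d - 1)) else none))
            (if 3 ≤ d + 1 ∧ pvMem strs t (n - (d + 1)) (n - (d + 1) + 3) then oadd1 (pvNB strs t n (d - 2)) else none))
            (if 4 ≤ d + 1 ∧ pvMem strs t (n - (d + 1)) (n - (d + 1) + 4) then oadd1 (pvNB strs t n (d - 3)) else none))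
            (if 5 ≤ d + 1 ∧ pvMem strs t (n - (d + 1)) (n - (d + 1) + 5) then oadd1 (pvNB strs t n (d - 4)) else none) := by
          simp only [List.foldl_cons, List.foldl_nil, oadd1_if, ominA_none_left]
        rw [pvNB]
        exact h1.symm.trans h2
      rw [e]
      have H := pvIsMin_chain5
        (1 ≤ d + 1 ∧ pvMem strs t (n - (d + 1)) (n - (d + 1) + 1))
        (2 ≤ d + 1 ∧ pvMem strs t (n - (d + 1)) (n - (d + 1) + 2))
        (3 ≤ d + 1 ∧ pvMem strs t (n - (d + 1)) (n - (d + 1) + 3))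
        (4 ≤ d + 1 ∧ pvMem strs t (n - (d + 1)) (n - (d + 1) + 4))
        (5 ≤ d + 1 ∧ pvMem strs t (n - (d + 1)) (n - (d + 1) + 5))
        (pvSegs strs t (n - d) n) (pvSegs strs t (n - (d - 1)) n) (pvSegs strs t (n - (d - 2)) n)
        (pvSegs strs t (n - (d - 3)) n) (pvSegs strs t (n - (d - 4)) n)
        (pvNB strs t n d) (pvNB strs t n (d - 1)) (pvNB strs t n (d - 2))
        (pvNB strs t n (d - 3)) (pvNB strs t n (d - 4))
        (ih d (by omega) (by omega)) (ih (d - 1) (by omega) (by omega))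
        (ih (d - 2) (by omega) (by omega)) (ih (d - 3) (by omega) (by omega))
        (ih (d - 4) (by omega) (by omega))
      refine pvIsMin_congr (fun k => ?_) H
      constructor
      · rintro ⟨j, rfl, (⟨⟨hl,hmem⟩,hseg⟩|⟨⟨hl,hmem⟩,hseg⟩|⟨⟨hl,hmem⟩,hseg⟩|⟨⟨hl,hmem⟩,hseg⟩|⟨⟨hl,hmem⟩,hseg⟩)⟩
        · refine pvSegs.cons ⟨by omega, by omega, by omega, hmem⟩ ?_
          have hx : n - d = n - (d + 1) + 1 := by omega
          rw [← hx]; exact hseg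
        · refine pvSegs.cons ⟨by omega, by omega, by omega, hmem⟩ ?_
          have hx : n - (d - 1) = n - (d + 1) + 2 := by omega
          rw [← hx]; exact hseg
        · refine pvSegs.cons ⟨by omega, by omega, by omega, hmem⟩ ?_
          have hx : n - (d - 2) = n - (d + 1) + 3 := by omega
          rw [← hx]; exact hseg
        · refine pvSegs.cons ⟨by omega, by omega, by omega, hmem⟩ ?_
          have hx : n - (d - 3) = n - (d + 1) + 4 := by omega
          rw [← hx]; exact hseg
        · refine pvSegs.cons ⟨by omega, by omega, by omega, hmem⟩ ?_
          have hx : n - (d - 4) = n - (d + 1) + 5 := by omega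
          rw [← hx]; exact hseg
      · intro hseg
        match k, hseg with
        | 0, hseg =>
          exfalso
          have := (pvSegs_zero_iff strs t (n - (d + 1)) n).mp hseg
          omega
        | (j + 1), hseg =>
          obtain ⟨m, ⟨hlt, hle5, hmn, hmem⟩, hsm⟩ := (pvSegs_succ_iff strs t (n - (d + 1)) n j).mp hseg
          refine ⟨j, rfl, ?_⟩
          have hl : m - (n - (d + 1)) = 1 ∨ m - (n - (d + 1)) = 2 ∨ m - (n - (d + 1)) = 3 ∨
              m - (n - (d + 1)) = 4 ∨ m - (n - (d + 1)) = 5 := by omega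
          rcases hl with h|h|h|h|h
          · refine Or.inl ⟨⟨by omega, ?_⟩, ?_⟩
            · have hx : n - (d + 1) + 1 = m := by omega
              rw [hx]; exact hmem
            · have hx : n - d = m := by omega
              rw [hx]; exact hsm
          · refine Or.inr (Or.inl ⟨⟨by omega, ?_⟩, ?_⟩)
            · have hx : n - (d + 1) + 2 = m := by omega
              rw [hx]; exact hmem
            · have hx : n - (d - 1) = m := by omega
              rw [hx]; exact hsm
          · refine Or.inr (Or.inr (Or.inl ⟨⟨by omega, ?_⟩, ?_⟩))
            · have hx : n - (d + 1) + 3 = m := by omega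
              rw [hx]; exact hmem
            · have hx : n - (d - 2) = m := by omega
              rw [hx]; exact hsm
          · refine Or.inr (Or.inr (Or.inr (Or.inl ⟨⟨by omega, ?_⟩, ?_⟩)))
            · have hx : n - (d + 1) + 4 = m := by omega
              rw [hx]; exact hmem
            · have hx : n - (d - 3) = m := by omega
              rw [hx]; exact hsm
          · refine Or.inr (Or.inr (Or.inr (Or.inr ⟨⟨by omega, ?_⟩, ?_⟩)))
            · have hx : n - (d + 1) + 5 = m := by omega
              rw [hx]; exact hmem
            · have hx : n - (d - 4) = m := by omega
              rw [hx]; exact hsm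
theorem pvMA_eq_pvNB (strs : List String) (t : String) :
    pvMA strs t t.toList.length = pvNB strs t t.toList.length t.toList.length := by
  have h1 := pvMA_isMin strs t t.toList.length le_rfl
  have h2 := pvNB_isMin strs t t.toList.length le_rfl
  simp only [Nat.sub_self] at h2
  exact pvIsMin_unique h1 h2

-- ===== port-to-recurrence bridges =====

def pvTblA (strs : List String) (t : String) (m : Nat) : List (Option Int) :=
  (List.range (t.toList.length + 1)).map (fun j => if j ≤ m then pvMA strs t j else none)

def pvTblB (strs : List String) (t : String) (d : Nat) : List (Option Int) :=
  (List.range (t.toList.length + 1)).map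
    (fun j => if t.toList.length ≤ j + d then pvNB strs t t.toList.length (t.toList.length - j) else none)

theorem pvMA_zero (strs : List String) (t : String) : pvMA strs t 0 = some 0 := by
  rw [pvMA]

theorem pvTblA_length (strs : List String) (t : String) (m : Nat) :
    (pvTblA strs t m).length = t.toList.length + 1 := by
  simp only [pvTblA, List.length_map, List.length_range]

theorem pvTblA_getD (strs : List String) (t : String) (m j : Nat) (hj : j ≤ t.toList.length) :
    (pvTblA strs t m).getD j none = if j ≤ m then pvMA strs t j else none := by
  rw [List.getD_eq_getElem _ _ (by simp only [pvTblA, List.length_map, List.length_range]; omega)]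
  simp only [pvTblA, List.getElem_map, List.getElem_range]

theorem pvTblA_set_id (strs : List String) (t : String) (m : Nat) :
    (pvTblA strs t m).set (m + 1) none = pvTblA strs t m := by
  apply List.ext_getElem (by simp)
  intro j h1 h2
  rw [List.getElem_set]
  split
  · next heq =>
    subst heq
    simp only [pvTblA, List.getElem_map, List.getElem_range]
    rw [if_neg (by omega)]
  · rfl

theorem pvTblA_set_succ (strs : List String) (t : String) (m : Nat) (_hm : m < t.toList.length) :
    (pvTblA strs t m).set (m + 1) (pvMA strs t (m + 1)) = pvTblA strs t (m + 1) := by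
  apply List.ext_getElem (by simp [pvTblA])
  intro j h1 h2
  rw [List.getElem_set]
  simp only [pvTblA, List.getElem_map, List.getElem_range]
  split
  · next heq => subst heq; rw [if_pos le_rfl]
  · next hne =>
    by_cases hj : j ≤ m
    · rw [if_pos hj, if_pos (by omega)]
    · rw [if_neg hj, if_neg (by omega)]

theorem pvInitA (strs : List String) (t : String) :
    PySem.List.pySetD (List.replicate (t.toList.length + 1) (none : Option Int)) 0 (some 0)
      = pvTblA strs t 0 := by
  rw [show (0 : Int) = ((0 : Nat) : Int) from rfl]
  unfold PySem.List.pySetD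
  rw [PySem.List.pySet?_natCast _ _ _ (by simp), Option.getD_some]
  apply List.ext_getElem (by rw [List.length_set, List.length_replicate, pvTblA_length])
  intro j h1 h2
  rw [List.getElem_set]
  simp only [pvTblA, List.getElem_map, List.getElem_range, List.getElem_replicate]
  split
  · next heq =>
    subst heq
    rw [if_pos (by omega), pvMA_zero]
    norm_num
  · next hne =>
    rw [if_neg (by omega)]

theorem pvStepA1 (strs : List String) (t : String) (m : Nat) (hm : m < t.toList.length)
    (li : Int) (l : Nat) (hli : li = (l : Int)) (hl : 1 ≤ l) (acc : Option Int) :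
    (if ((m : Int) + 1) - li < 0 then (pvTblA strs t m).set (m + 1) acc
     else if PySem.Set.contains (PySem.Set.ofList strs)
         (PySem.Str.slice t (some (((m : Int) + 1) - li)) (some ((m : Int) + 1))) then
       PySem.List.pySetD ((pvTblA strs t m).set (m + 1) acc) ((m : Int) + 1)
         (ominA (PySem.List.pyGetD ((pvTblA strs t m).set (m + 1) acc) ((m : Int) + 1) none)
           (oadd1 (PySem.List.pyGetD ((pvTblA strs t m).set (m + 1) acc) (((m : Int) + 1) - li) none)))
     else (pvTblA strs t m).set (m + 1) acc)
    = (pvTblA strs t m).set (m + 1)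
        (ominA acc (if l ≤ m + 1 ∧ pvMem strs t (m + 1 - l) (m + 1) then
          oadd1 (pvMA strs t (m + 1 - l)) else none)) := by
  subst hli
  by_cases hle : l ≤ m + 1
  · rw [if_neg (by omega)]
    have hidx : ((m : Int) + 1) - (l : Int) = ((m + 1 - l : Nat) : Int) := by omega
    have hidx2 : ((m : Int) + 1) = ((m + 1 : Nat) : Int) := by omega
    rw [hidx, hidx2]
    have hget1 : PySem.List.pyGetD ((pvTblA strs t m).set (m + 1) acc) ((m + 1 : Nat) : Int) none
        = acc := by
      rw [PySem.List.pyGetD_natCast]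
      rw [List.getD_eq_getElem _ _ (by rw [List.length_set, pvTblA_length]; omega)]
      rw [List.getElem_set]
      rw [if_pos rfl]
    have hget2 : PySem.List.pyGetD ((pvTblA strs t m).set (m + 1) acc) ((m + 1 - l : Nat) : Int) none
        = pvMA strs t (m + 1 - l) := by
      rw [PySem.List.pyGetD_natCast]
      rw [List.getD_eq_getElem _ _ (by rw [List.length_set, pvTblA_length]; omega)]
      rw [List.getElem_set, if_neg (by omega)]
      simp only [pvTblA, List.getElem_map, List.getElem_range]
      rw [if_pos (by omega)]
    have hset : PySem.List.pySetD ((pvTblA strs t m).set (m + 1) acc) ((m + 1 : Nat) : Int)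
          (ominA acc (oadd1 (pvMA strs t (m + 1 - l))))
        = (pvTblA strs t m).set (m + 1) (ominA acc (oadd1 (pvMA strs t (m + 1 - l)))) := by
      unfold PySem.List.pySetD
      rw [PySem.List.pySet?_natCast _ _ _ (by rw [List.length_set, pvTblA_length]; omega),
        Option.getD_some, List.set_set]
    have hslice : PySem.Str.slice t (some ((m + 1 - l : Nat) : Int)) (some ((m + 1 : Nat) : Int))
        = pvSeg t (m + 1 - l) (m + 1) := rfl
    rw [hslice]
    by_cases hmem : pvMem strs t (m + 1 - l) (m + 1)
    · rw [if_pos (by rw [PySem.Set.contains_iff]; rw [PySem.Set.mem_ofList]; exact hmem)]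
      rw [hget1, hget2, hset, if_pos ⟨hle, hmem⟩]
    · rw [if_neg (by rw [PySem.Set.contains_iff, PySem.Set.mem_ofList]; exact hmem)]
      rw [if_neg (fun h => hmem h.2), ominA_none_right]
  · rw [if_pos (by omega), if_neg (fun h => hle h.1), ominA_none_right]

theorem pvOuterA (strs : List String) (t : String) (m : Nat) (hm : m < t.toList.length) :
    (PySem.List.pyRange 1 6 1).foldl (fun dp l =>
      if ((m : Int) + 1) - l < 0 then dp
      else
        if PySem.Set.contains (PySem.Set.ofList strs)
            (PySem.Str.slice t (some (((m : Int) + 1) - l)) (some ((m : Int) + 1))) then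
          PySem.List.pySetD dp ((m : Int) + 1)
            (ominA (PySem.List.pyGetD dp ((m : Int) + 1) none)
              (oadd1 (PySem.List.pyGetD dp (((m : Int) + 1) - l) none)))
        else dp) (pvTblA strs t m) = pvTblA strs t (m + 1) := by
  have hR : PySem.List.pyRange 1 6 1 = [1, 2, 3, 4, 5] := by decide
  rw [hR]
  rw [← pvTblA_set_id strs t m]
  simp only [List.foldl_cons, List.foldl_nil]
  rw [pvStepA1 strs t m hm 1 1 (by decide) (by omega) none, ominA_none_left]
  rw [pvStepA1 strs t m hm 2 2 (by decide) (by omega)]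
  rw [pvStepA1 strs t m hm 3 3 (by decide) (by omega)]
  rw [pvStepA1 strs t m hm 4 4 (by decide) (by omega)]
  rw [pvStepA1 strs t m hm 5 5 (by decide) (by omega)]
  rw [show (ominA (ominA (ominA (ominA
      (if 1 ≤ m + 1 ∧ pvMem strs t (m + 1 - 1) (m + 1) then oadd1 (pvMA strs t (m + 1 - 1)) else none)
      (if 2 ≤ m + 1 ∧ pvMem strs t (m + 1 - 2) (m + 1) then oadd1 (pvMA strs t (m + 1 - 2)) else none))
      (if 3 ≤ m + 1 ∧ pvMem strs t (m + 1 - 3) (m + 1) then oadd1 (pvMA strs t (m + 1 - 3)) else none))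
      (if 4 ≤ m + 1 ∧ pvMem strs t (m + 1 - 4) (m + 1) then oadd1 (pvMA strs t (m + 1 - 4)) else none))
      (if 5 ≤ m + 1 ∧ pvMem strs t (m + 1 - 5) (m + 1) then oadd1 (pvMA strs t (m + 1 - 5)) else none))
      = pvMA strs t (m + 1) from by rw [pvMA]]
  exact pvTblA_set_succ strs t m hm

theorem pvFoldA (strs : List String) (t : String) :
    ∀ m, m ≤ t.toList.length →
    (PySem.List.pyRange 1 ((m : Int) + 1) 1).foldl (fun dp i =>
      (PySem.List.pyRange 1 6 1).foldl (fun dp l =>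
        if i - l < 0 then dp
        else
          if PySem.Set.contains (PySem.Set.ofList strs)
              (PySem.Str.slice t (some (i - l)) (some i)) then
            PySem.List.pySetD dp i
              (ominA (PySem.List.pyGetD dp i none)
                (oadd1 (PySem.List.pyGetD dp (i - l) none)))
          else dp) dp) (pvTblA strs t 0) = pvTblA strs t m := by
  intro m
  induction m with
  | zero =>
    intro _
    rw [show PySem.List.pyRange 1 (((0 : Nat) : Int) + 1) 1 = ([] : List Int) from
      PySem.List.pyRange_one_eq_nil (by norm_num)]
    rfl
  | succ m ih =>
    intro hm
    have hsplit : PySem.List.pyRange 1 (((m + 1 : Nat) : Int) + 1) 1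
        = PySem.List.pyRange 1 ((m : Int) + 1) 1 ++ [(m : Int) + 1] := by
      have : ((m + 1 : Nat) : Int) + 1 = ((m : Int) + 1) + 1 := by omega
      rw [this, PySem.List.pyRange_one_succ_right (by omega)]
    rw [hsplit, List.foldl_append, ih (by omega)]
    simp only [List.foldl_cons, List.foldl_nil]
    exact pvOuterA strs t m (by omega)

theorem pvBridgeA (strs : List String) (t : String) :
    solution strs t = (match pvMA strs t t.toList.length with
      | some v => v
      | none => -1) := by
  unfold solution
  simp only [PySem.Str.len_eq]
  rw [show ((t.toList.length : Int) + 1).toNat = t.toList.length + 1 from by omega]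
  rw [pvInitA strs t]
  rw [show ((t.toList.length : Int) + 1) = (((t.toList.length : Nat) : Int) + 1) from rfl]
  rw [pvFoldA strs t t.toList.length le_rfl]
  rw [PySem.List.pyGetD_natCast]
  rw [pvTblA_getD strs t _ _ le_rfl, if_pos le_rfl]

theorem pvNB_zero (strs : List String) (t : String) (n : Nat) : pvNB strs t n 0 = some 0 := by
  rw [pvNB]

theorem pvTblB_length (strs : List String) (t : String) (d : Nat) :
    (pvTblB strs t d).length = t.toList.length + 1 := by
  simp only [pvTblB, List.length_map, List.length_range]

theorem pvTblB_getElem (strs : List String) (t : String) (d j : Nat) (_hj : j < t.toList.length + 1)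
    (h' : j < (pvTblB strs t d).length) :
    (pvTblB strs t d)[j] = if t.toList.length ≤ j + d then
      pvNB strs t t.toList.length (t.toList.length - j) else none := by
  simp only [pvTblB, List.getElem_map, List.getElem_range]

theorem pvInitB (strs : List String) (t : String) :
    PySem.List.pySetD (List.replicate (t.toList.length + 1) (none : Option Int))
      ((t.toList.length : Nat) : Int) (some 0) = pvTblB strs t 0 := by
  unfold PySem.List.pySetD
  rw [PySem.List.pySet?_natCast _ _ _ (by rw [List.length_replicate]; omega), Option.getD_some]
  apply List.ext_getElem (by rw [List.length_set, List.length_replicate, pvTblB_length])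
  intro j h1 h2
  rw [List.getElem_set, pvTblB_getElem strs t 0 j (by rw [List.length_set, List.length_replicate] at h1; omega) h2]
  split
  · next heq =>
    subst heq
    rw [if_pos (by omega), Nat.sub_self, pvNB_zero]
  · next hne =>
    rw [List.getElem_replicate, if_neg (by rw [List.length_set, List.length_replicate] at h1; omega)]

theorem pvSegB_toList (t : String) (s l : Nat) :
    (pvSeg t s (s + l)).toList = (t.toList.drop s).take l := by
  unfold pvSeg
  rw [show ((s + l : Nat) : Int) = ((s : Nat) : Int) + ((l : Nat) : Int) from by omega]
  rw [show (PySem.Str.slice t (some ((s : Nat) : Int)) (some (((s : Nat) : Int) + ((l : Nat) : Int)))).toList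
    = PySem.List.slice t.toList (some ((s : Nat) : Int)) (some (((s : Nat) : Int) + ((l : Nat) : Int)))
    from by simp [PySem.Str.slice]]
  rw [PySem.List.slice_natCast_add]

theorem pvSegB_len (t : String) (s l : Nat) (hsl : s + l ≤ t.toList.length) :
    (pvSeg t s (s + l)).toList.length = l := by
  rw [pvSegB_toList, List.length_take, List.length_drop]
  omega

theorem pvCandsB (strs : List String) (t : String) (s : Nat) (hs : s < t.toList.length) (v : Int) :
    (v ∈ (PySem.Set.ofList (strs.filter (fun w =>
        decide (1 ≤ ((w.toList.length : Nat) : Int)) && decide (((w.toList.length : Nat) : Int) ≤ 5)))).filterMap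
      (fun w =>
        if PySem.Str.slice t (some ((s : Nat) : Int))
            (some (((s : Nat) : Int) + ((w.toList.length : Nat) : Int))) == w then
          PySem.List.pyGetD (pvTblB strs t (t.toList.length - s - 1))
            (((s : Nat) : Int) + ((w.toList.length : Nat) : Int)) none
        else none))
    ↔ ∃ l, (l = 1 ∨ l = 2 ∨ l = 3 ∨ l = 4 ∨ l = 5) ∧ s + l ≤ t.toList.length ∧
        pvMem strs t s (s + l) ∧
        pvNB strs t t.toList.length (t.toList.length - (s + l)) = some v := by
  rw [List.mem_filterMap]
  constructor
  · rintro ⟨w, hw, hf⟩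
    rw [PySem.Set.mem_ofList, List.mem_filter, Bool.and_eq_true, decide_eq_true_eq,
      decide_eq_true_eq] at hw
    obtain ⟨hws, hw1, hw5⟩ := hw
    have hl1 : 1 ≤ w.toList.length := by exact_mod_cast hw1
    have hl5 : w.toList.length ≤ 5 := by exact_mod_cast hw5
    by_cases hbe : (PySem.Str.slice t (some ((s : Nat) : Int))
        (some (((s : Nat) : Int) + ((w.toList.length : Nat) : Int))) == w) = true
    · rw [if_pos hbe] at hf
      rw [beq_iff_eq] at hbe
      have hcast : ((s : Nat) : Int) + ((w.toList.length : Nat) : Int)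
          = ((s + w.toList.length : Nat) : Int) := by omega
      rw [hcast] at hbe hf
      have hbe' : pvSeg t s (s + w.toList.length) = w := hbe
      have htl : (pvSeg t s (s + w.toList.length)).toList = w.toList := by rw [hbe']
      rw [pvSegB_toList] at htl
      have hlen : ((t.toList.drop s).take w.toList.length).length = w.toList.length := by
        rw [htl]
      rw [List.length_take, List.length_drop] at hlen
      have hsl : s + w.toList.length ≤ t.toList.length := by omega
      refine ⟨w.toList.length, by omega, hsl, ?_, ?_⟩
      · unfold pvMem
        rw [hbe']
        exact hws
      · rw [PySem.List.pyGetD_natCast] at hf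
        rw [List.getD_eq_getElem _ _ (by rw [pvTblB_length]; omega)] at hf
        rw [pvTblB_getElem strs t _ _ (by omega) (by rw [pvTblB_length]; omega)] at hf
        rw [if_pos (by omega)] at hf
        exact hf
    · rw [if_neg hbe] at hf
      exact absurd hf (by simp)
  · rintro ⟨l, hl15, hsl, hmem, hval⟩
    have hlen : (pvSeg t s (s + l)).toList.length = l := pvSegB_len t s l hsl
    refine ⟨pvSeg t s (s + l), ?_, ?_⟩
    · rw [PySem.Set.mem_ofList, List.mem_filter, Bool.and_eq_true, decide_eq_true_eq,
        decide_eq_true_eq, hlen]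
      exact ⟨hmem, by omega, by omega⟩
    · rw [hlen]
      rw [show ((s : Nat) : Int) + ((l : Nat) : Int) = ((s + l : Nat) : Int) from by omega]
      rw [show (PySem.Str.slice t (some ((s : Nat) : Int)) (some ((s + l : Nat) : Int))
        == pvSeg t s (s + l)) = true from by rw [beq_iff_eq]; rfl]
      rw [if_pos rfl]
      rw [PySem.List.pyGetD_natCast]
      rw [List.getD_eq_getElem _ _ (by rw [pvTblB_length]; omega)]
      rw [pvTblB_getElem strs t _ _ (by omega) (by rw [pvTblB_length]; omega)]
      rw [if_pos (by omega)]
      exact hval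

theorem pvLstB (strs : List String) (t : String) (s : Nat) (hs : s < t.toList.length) (v : Int) :
    (v ∈ ([(if 1 ≤ t.toList.length - s - 1 + 1 ∧
          pvMem strs t (t.toList.length - (t.toList.length - s - 1 + 1))
            (t.toList.length - (t.toList.length - s - 1 + 1) + 1) then
          pvNB strs t t.toList.length (t.toList.length - s - 1) else none),
        (if 2 ≤ t.toList.length - s - 1 + 1 ∧
          pvMem strs t (t.toList.length - (t.toList.length - s - 1 + 1))
            (t.toList.length - (t.toList.length - s - 1 + 1) + 2) then
          pvNB strs t t.toList.length (t.toList.length - s - 1 - 1) else none),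
        (if 3 ≤ t.toList.length - s - 1 + 1 ∧
          pvMem strs t (t.toList.length - (t.toList.length - s - 1 + 1))
            (t.toList.length - (t.toList.length - s - 1 + 1) + 3) then
          pvNB strs t t.toList.length (t.toList.length - s - 1 - 2) else none),
        (if 4 ≤ t.toList.length - s - 1 + 1 ∧
          pvMem strs t (t.toList.length - (t.toList.length - s - 1 + 1))
            (t.toList.length - (t.toList.length - s - 1 + 1) + 4) then
          pvNB strs t t.toList.length (t.toList.length - s - 1 - 3) else none),
        (if 5 ≤ t.toList.length - s - 1 + 1 ∧
          pvMem strs t (t.toList.length - (t.toList.length - s - 1 + 1))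
            (t.toList.length - (t.toList.length - s - 1 + 1) + 5) then
          pvNB strs t t.toList.length (t.toList.length - s - 1 - 4) else none)]).filterMap id)
    ↔ ∃ l, (l = 1 ∨ l = 2 ∨ l = 3 ∨ l = 4 ∨ l = 5) ∧ s + l ≤ t.toList.length ∧
        pvMem strs t s (s + l) ∧
        pvNB strs t t.toList.length (t.toList.length - (s + l)) = some v := by
  have hidx : t.toList.length - (t.toList.length - s - 1 + 1) = s := by omega
  rw [hidx]
  have hd1 : t.toList.length - s - 1 = t.toList.length - (s + 1) := by omega
  have hd2 : t.toList.length - s - 1 - 1 = t.toList.length - (s + 2) := by omega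
  have hd3 : t.toList.length - s - 1 - 2 = t.toList.length - (s + 3) := by omega
  have hd4 : t.toList.length - s - 1 - 3 = t.toList.length - (s + 4) := by omega
  have hd5 : t.toList.length - s - 1 - 4 = t.toList.length - (s + 5) := by omega
  rw [List.mem_filterMap]
  constructor
  · rintro ⟨o, ho, hov⟩
    simp only [List.mem_cons, List.not_mem_nil, or_false] at ho
    simp only [id] at hov
    rcases ho with rfl|rfl|rfl|rfl|rfl
    · rw [hd1] at hov
      split at hov
      · next hg => exact ⟨1, by omega, by omega, by simpa using hg.2, hov⟩
      · exact absurd hov (by simp)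
    · rw [hd2] at hov
      split at hov
      · next hg => exact ⟨2, by omega, by omega, by simpa using hg.2, hov⟩
      · exact absurd hov (by simp)
    · rw [hd3] at hov
      split at hov
      · next hg => exact ⟨3, by omega, by omega, by simpa using hg.2, hov⟩
      · exact absurd hov (by simp)
    · rw [hd4] at hov
      split at hov
      · next hg => exact ⟨4, by omega, by omega, by simpa using hg.2, hov⟩
      · exact absurd hov (by simp)
    · rw [hd5] at hov
      split at hov
      · next hg => exact ⟨5, by omega, by omega, by simpa using hg.2, hov⟩
      · exact absurd hov (by simp)
  · rintro ⟨l, hl15, hsl, hmem, hval⟩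
    rcases hl15 with rfl|rfl|rfl|rfl|rfl
    · refine ⟨_, List.mem_cons_self .., ?_⟩
      rw [hd1, if_pos ⟨by omega, hmem⟩]
      exact hval
    · refine ⟨_, List.mem_cons_of_mem _ (List.mem_cons_self ..), ?_⟩
      rw [hd2, if_pos ⟨by omega, hmem⟩]
      exact hval
    · refine ⟨_, List.mem_cons_of_mem _ (List.mem_cons_of_mem _ (List.mem_cons_self ..)), ?_⟩
      rw [hd3, if_pos ⟨by omega, hmem⟩]
      exact hval
    · refine ⟨_, List.mem_cons_of_mem _ (List.mem_cons_of_mem _ (List.mem_cons_of_mem _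
        (List.mem_cons_self ..))), ?_⟩
      rw [hd4, if_pos ⟨by omega, hmem⟩]
      exact hval
    · refine ⟨_, List.mem_cons_of_mem _ (List.mem_cons_of_mem _ (List.mem_cons_of_mem _
        (List.mem_cons_of_mem _ (List.mem_cons_self ..)))), ?_⟩
      rw [hd5, if_pos ⟨by omega, hmem⟩]
      exact hval

theorem pvTblB_set (strs : List String) (t : String) (s : Nat) (hs : s < t.toList.length)
    (w : Option Int) (hw : w = pvNB strs t t.toList.length (t.toList.length - s)) :
    (pvTblB strs t (t.toList.length - s - 1)).set s w = pvTblB strs t (t.toList.length - s) := by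
  apply List.ext_getElem (by rw [List.length_set, pvTblB_length, pvTblB_length])
  intro j h1 h2
  rw [List.getElem_set]
  rw [pvTblB_getElem strs t _ _ (by rw [pvTblB_length] at h2; omega) h2]
  split
  · next heq =>
    subst heq
    rw [if_pos (by omega), hw, show t.toList.length - (s : Nat) = t.toList.length - s from rfl]
  · next hne =>
    rw [pvTblB_getElem strs t _ _ (by rw [List.length_set, pvTblB_length] at h1; omega)
      (by rw [List.length_set] at h1; exact h1)]
    by_cases hj : t.toList.length ≤ j + (t.toList.length - s - 1)
    · rw [if_pos hj, if_pos (by omega)]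
    · rw [if_neg hj, if_neg (by omega)]

theorem pvStepB (strs : List String) (t : String) (s : Nat) (hs : s < t.toList.length) :
    (match PySem.List.min?
        ((PySem.Set.ofList (strs.filter (fun w =>
            decide (1 ≤ ((w.toList.length : Nat) : Int)) && decide (((w.toList.length : Nat) : Int) ≤ 5)))).filterMap
          (fun w =>
            if PySem.Str.slice t (some ((s : Nat) : Int))
                (some (((s : Nat) : Int) + ((w.toList.length : Nat) : Int))) == w then
              PySem.List.pyGetD (pvTblB strs t (t.toList.length - s - 1))
                (((s : Nat) : Int) + ((w.toList.length : Nat) : Int)) none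
            else none)) (fun x => x) with
      | some m => PySem.List.pySetD (pvTblB strs t (t.toList.length - s - 1)) ((s : Nat) : Int)
          (some (1 + m))
      | none => pvTblB strs t (t.toList.length - s - 1))
    = pvTblB strs t (t.toList.length - s) := by
  have hNB : pvNB strs t t.toList.length (t.toList.length - s) =
      (PySem.List.min?
        (([(if 1 ≤ t.toList.length - s - 1 + 1 ∧
            pvMem strs t (t.toList.length - (t.toList.length - s - 1 + 1))
              (t.toList.length - (t.toList.length - s - 1 + 1) + 1) then
            pvNB strs t t.toList.length (t.toList.length - s - 1) else none),
          (if 2 ≤ t.toList.length - s - 1 + 1 ∧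
            pvMem strs t (t.toList.length - (t.toList.length - s - 1 + 1))
              (t.toList.length - (t.toList.length - s - 1 + 1) + 2) then
            pvNB strs t t.toList.length (t.toList.length - s - 1 - 1) else none),
          (if 3 ≤ t.toList.length - s - 1 + 1 ∧
            pvMem strs t (t.toList.length - (t.toList.length - s - 1 + 1))
              (t.toList.length - (t.toList.length - s - 1 + 1) + 3) then
            pvNB strs t t.toList.length (t.toList.length - s - 1 - 2) else none),
          (if 4 ≤ t.toList.length - s - 1 + 1 ∧
            pvMem strs t (t.toList.length - (t.toList.length - s - 1 + 1))
              (t.toList.length - (t.toList.length - s - 1 + 1) + 4) then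
            pvNB strs t t.toList.length (t.toList.length - s - 1 - 3) else none),
          (if 5 ≤ t.toList.length - s - 1 + 1 ∧
            pvMem strs t (t.toList.length - (t.toList.length - s - 1 + 1))
              (t.toList.length - (t.toList.length - s - 1 + 1) + 5) then
            pvNB strs t t.toList.length (t.toList.length - s - 1 - 4) else none)]).filterMap id)
        (fun x => x)).map (fun m => 1 + m) := by
    rw [show t.toList.length - s = (t.toList.length - s - 1) + 1 from by omega]
    rw [pvNB]
    rfl
  have hmeq : PySem.List.min?
        ((PySem.Set.ofList (strs.filter (fun w =>
            decide (1 ≤ ((w.toList.length : Nat) : Int)) && decide (((w.toList.length : Nat) : Int) ≤ 5)))).filterMap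
          (fun w =>
            if PySem.Str.slice t (some ((s : Nat) : Int))
                (some (((s : Nat) : Int) + ((w.toList.length : Nat) : Int))) == w then
              PySem.List.pyGetD (pvTblB strs t (t.toList.length - s - 1))
                (((s : Nat) : Int) + ((w.toList.length : Nat) : Int)) none
            else none)) (fun x => x)
      = PySem.List.min?
        (([(if 1 ≤ t.toList.length - s - 1 + 1 ∧
            pvMem strs t (t.toList.length - (t.toList.length - s - 1 + 1))
              (t.toList.length - (t.toList.length - s - 1 + 1) + 1) then
            pvNB strs t t.toList.length (t.toList.length - s - 1) else none),
          (if 2 ≤ t.toList.length - s - 1 + 1 ∧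
            pvMem strs t (t.toList.length - (t.toList.length - s - 1 + 1))
              (t.toList.length - (t.toList.length - s - 1 + 1) + 2) then
            pvNB strs t t.toList.length (t.toList.length - s - 1 - 1) else none),
          (if 3 ≤ t.toList.length - s - 1 + 1 ∧
            pvMem strs t (t.toList.length - (t.toList.length - s - 1 + 1))
              (t.toList.length - (t.toList.length - s - 1 + 1) + 3) then
            pvNB strs t t.toList.length (t.toList.length - s - 1 - 2) else none),
          (if 4 ≤ t.toList.length - s - 1 + 1 ∧
            pvMem strs t (t.toList.length - (t.toList.length - s - 1 + 1))
              (t.toList.length - (t.toList.length - s - 1 + 1) + 4) then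
            pvNB strs t t.toList.length (t.toList.length - s - 1 - 3) else none),
          (if 5 ≤ t.toList.length - s - 1 + 1 ∧
            pvMem strs t (t.toList.length - (t.toList.length - s - 1 + 1))
              (t.toList.length - (t.toList.length - s - 1 + 1) + 5) then
            pvNB strs t t.toList.length (t.toList.length - s - 1 - 4) else none)]).filterMap id)
        (fun x => x) := by
    apply pvMin?_ext
    intro v
    rw [pvCandsB strs t s hs v, pvLstB strs t s hs v]
  have hNB' : pvNB strs t t.toList.length (t.toList.length - s) =
      (PySem.List.min?
        ((PySem.Set.ofList (strs.filter (fun w =>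
            decide (1 ≤ ((w.toList.length : Nat) : Int)) && decide (((w.toList.length : Nat) : Int) ≤ 5)))).filterMap
          (fun w =>
            if PySem.Str.slice t (some ((s : Nat) : Int))
                (some (((s : Nat) : Int) + ((w.toList.length : Nat) : Int))) == w then
              PySem.List.pyGetD (pvTblB strs t (t.toList.length - s - 1))
                (((s : Nat) : Int) + ((w.toList.length : Nat) : Int)) none
            else none)) (fun x => x)).map (fun m => 1 + m) := by
    rw [hNB, ← hmeq]
  cases hmin : PySem.List.min?
        ((PySem.Set.ofList (strs.filter (fun w =>
            decide (1 ≤ ((w.toList.length : Nat) : Int)) && decide (((w.toList.length : Nat) : Int) ≤ 5)))).filterMap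
          (fun w =>
            if PySem.Str.slice t (some ((s : Nat) : Int))
                (some (((s : Nat) : Int) + ((w.toList.length : Nat) : Int))) == w then
              PySem.List.pyGetD (pvTblB strs t (t.toList.length - s - 1))
                (((s : Nat) : Int) + ((w.toList.length : Nat) : Int)) none
            else none)) (fun x => x) with
  | none =>
    show pvTblB strs t (t.toList.length - s - 1) = pvTblB strs t (t.toList.length - s)
    have h0 : (pvTblB strs t (t.toList.length - s - 1)).set s none
        = pvTblB strs t (t.toList.length - s - 1) := by
      apply List.ext_getElem (by rw [List.length_set])
      intro j h1 h2
      rw [List.getElem_set]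
      split
      · next heq =>
        subst heq
        rw [pvTblB_getElem strs t _ _ (by rw [pvTblB_length] at h2; omega) h2,
          if_neg (by omega)]
      · rfl
    rw [← h0]
    exact pvTblB_set strs t s hs none (by rw [hNB', hmin]; rfl)
  | some m =>
    show PySem.List.pySetD (pvTblB strs t (t.toList.length - s - 1)) ((s : Nat) : Int)
        (some (1 + m)) = pvTblB strs t (t.toList.length - s)
    have hset : PySem.List.pySetD (pvTblB strs t (t.toList.length - s - 1)) ((s : Nat) : Int)
        (some (1 + m)) = (pvTblB strs t (t.toList.length - s - 1)).set s (some (1 + m)) := by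
      unfold PySem.List.pySetD
      rw [PySem.List.pySet?_natCast _ _ _ (by rw [pvTblB_length]; omega), Option.getD_some]
    rw [hset]
    exact pvTblB_set strs t s hs (some (1 + m)) (by rw [hNB', hmin]; rfl)

theorem pvFoldB (strs : List String) (t : String) :
    ∀ s, s ≤ t.toList.length →
    (PySem.List.pyRange (((s : Nat) : Int) - 1) (-1) (-1)).foldl (fun best i =>
      match PySem.List.min?
          ((PySem.Set.ofList (strs.filter (fun w =>
              decide (1 ≤ ((w.toList.length : Nat) : Int)) && decide (((w.toList.length : Nat) : Int) ≤ 5)))).filterMap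
            (fun w =>
              if PySem.Str.slice t (some i) (some (i + ((w.toList.length : Nat) : Int))) == w then
                PySem.List.pyGetD best (i + ((w.toList.length : Nat) : Int)) none
              else none)) (fun x => x) with
        | some m => PySem.List.pySetD best i (some ((1 : Int) + m))
        | none => best) (pvTblB strs t (t.toList.length - s))
      = pvTblB strs t t.toList.length := by
  intro s
  induction s with
  | zero =>
    intro _
    rw [show (((0 : Nat) : Int) - 1) = (-1 : Int) from by norm_num]
    rw [PySem.List.pyRange_neg_one_eq_nil (le_refl (-1))]
    rw [Nat.sub_zero]
    rfl
  | succ s ih =>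
    intro hs1
    rw [show (((s + 1 : Nat) : Int) - 1) = ((s : Nat) : Int) from by push_cast; ring]
    rw [PySem.List.pyRange_neg_one_cons (by omega)]
    rw [List.foldl_cons]
    rw [show t.toList.length - (s + 1) = t.toList.length - s - 1 from by omega]
    rw [pvStepB strs t s (by omega)]
    exact ih (by omega)

theorem pvBridgeB (strs : List String) (t : String) :
    solution_alt strs t = (match pvNB strs t t.toList.length t.toList.length with
      | some v => v
      | none => -1) := by
  unfold solution_alt
  simp only [PySem.Str.len_eq]
  rw [show ((t.toList.length : Int) + 1).toNat = t.toList.length + 1 from by omega]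
  rw [pvInitB strs t]
  have hfold := pvFoldB strs t t.toList.length le_rfl
  rw [Nat.sub_self] at hfold
  show (match PySem.List.pyGetD
      ((PySem.List.pyRange (((t.toList.length : Nat) : Int) - 1) (-1) (-1)).foldl (fun best i =>
        match PySem.List.min? ((PySem.Set.ofList (strs.filter (fun w =>
            decide (1 ≤ ((w.toList.length : Nat) : Int)) && decide (((w.toList.length : Nat) : Int) ≤ 5)))).filterMap
          (fun w =>
            if PySem.Str.slice t (some i) (some (i + ((w.toList.length : Nat) : Int))) == w then
              PySem.List.pyGetD best (i + ((w.toList.length : Nat) : Int)) none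
            else none)) (fun x => x) with
        | some m => PySem.List.pySetD best i (some ((1 : Int) + m))
        | none => best) (pvTblB strs t 0)) (0 : Int) none with
    | some v => v
    | none => -1) = (match pvNB strs t t.toList.length t.toList.length with
    | some v => v
    | none => -1)
  rw [hfold]
  rw [show (0 : Int) = ((0 : Nat) : Int) from rfl, PySem.List.pyGetD_natCast]
  rw [List.getD_eq_getElem _ _ (by rw [pvTblB_length]; omega)]
  rw [pvTblB_getElem strs t _ _ (by omega) (by rw [pvTblB_length]; omega)]
  rw [if_pos (by omega), Nat.sub_zero]

-- ===== VERDICT (by name: the statement is the Claim_ definition above) =====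
theorem solution_spec : Claim_equal_solution := by
  intro strs t _
  unfold Spec_solution
  rw [pvBridgeA, pvBridgeB, pvMA_eq_pvNB]
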